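-- pv_equiv track=rewrite | github.com/HarbY-skcu/ML-Projects | Trees_Boosting_&_Bagging/PoisonMushroomTree.py | best_feature
-- ===== SOURCE A (Python) =====
-- from collections import Counter, defaultdict
--
-- def partition(rows, feature_index):
--     """Split data based on feature values."""
--     partitions = defaultdict(list)
--     for row in rows:
--         key = row[feature_index + 1]  # +1 because col 0 = class
--         partitions[key].append(row)
--     return partitions
--
-- def best_feature(rows, feature_indices):
--     """Pick the feature that minimizes classification error."""
--     best_feat = None
--     lowest_error = float("inf")
--
--     for i in feature_indices:
--         parts = partition(rows, i)
--         error = 0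
--         for subset in parts.values():
--             labels = [r[0] for r in subset]
--             majority = Counter(labels).most_common(1)[0][0]
--             error += sum(1 for l in labels if l != majority)
--         if error < lowest_error:
--             lowest_error = error
--             best_feat = i
--     return best_feat
-- ===== SOURCE B (Python) =====
-- def best_feature(rows, feature_indices):
--     """Pick the feature that minimizes classification error.
--
--     Sort-then-scan instead of hash partitioning: for each feature, sort the
--     (value, label) pairs lexicographically, so equal values are contiguous
--     and, inside a value block, equal labels are contiguous too.  One linear
--     scan then adds up, per value block, the longest label run (= the
--     majority count); error = len(rows) - that sum.  The winning feature is
--     picked with min(..., key=...), whose strict-< first-minimum rule matches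
--     the original selection."""
--     if not feature_indices:
--         return None
--
--     def split_error(i):
--         pairs = sorted((row[i + 1], row[0]) for row in rows)
--         correct = 0
--         while pairs:
--             v = pairs[0][0]
--             k = 1
--             while k < len(pairs) and pairs[k][0] == v:
--                 k += 1
--             group, pairs = pairs[:k], pairs[k:]
--             best = 0
--             while group:
--                 l = group[0][1]
--                 m = 1
--                 while m < len(group) and group[m][1] == l:
--                     m += 1
--                 best = max(best, m)
--                 group = group[m:]
--             correct += best
--         return len(rows) - correct
--
--     return min(feature_indices, key=split_error)
-- ===== Notes on version B (the rewrite author's own statement) =====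
-- stated objective: alternative
-- what changed: B replaces A's hash-partition of rows plus Counter majority vote per group with a sort-then-scan: per feature it sorts the (value,label) pairs lexicographically and one linear scan over the runs adds the longest label run per value block (the majority count), taking error = n - sum; the winner is picked with min(key=split_error), preserving strict-< first-feature tie-breaking.
import Mathlib
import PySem

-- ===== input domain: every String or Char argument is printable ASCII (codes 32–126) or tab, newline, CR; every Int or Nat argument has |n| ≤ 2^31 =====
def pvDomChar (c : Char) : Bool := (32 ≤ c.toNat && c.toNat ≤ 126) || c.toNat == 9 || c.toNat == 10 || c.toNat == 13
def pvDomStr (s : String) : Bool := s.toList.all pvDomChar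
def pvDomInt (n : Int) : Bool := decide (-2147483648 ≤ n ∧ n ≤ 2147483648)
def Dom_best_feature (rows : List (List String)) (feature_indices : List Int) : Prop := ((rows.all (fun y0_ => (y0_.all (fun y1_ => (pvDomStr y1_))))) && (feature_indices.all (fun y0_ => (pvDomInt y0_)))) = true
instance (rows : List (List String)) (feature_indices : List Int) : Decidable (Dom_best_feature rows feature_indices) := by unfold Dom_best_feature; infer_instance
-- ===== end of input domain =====

-- B replaces A's hash-partition + Counter majority vote by sort-then-scan (lexicographically
-- sorted (value,label) pairs, longest label run per value block) with min(key=...) selection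
-- (objective: alternative).


-- ===== PORT A =====
-- partition(rows, feature_index): defaultdict(list); partitions[row[feature_index+1]].append(row)
def pvPartition (rows : List (List String)) (feature_index : Int) :
    PySem.Dict String (List (List String)) :=
  rows.foldl
    (fun d row =>
      d.modify ((PySem.List.pyGet? row (feature_index + 1)).getD "") [] (· ++ [row]))
    PySem.Dict.empty

-- Counter(labels).most_common(1)[0][0]: the first key attaining the maximal count
-- (most_common sorts by count descending, stably — exact). [] = IndexError, unreachable
-- (every partition group is nonempty).
def pvMajority (labels : List String) : String :=
  match (PySem.Dict.counter labels).items with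
  | [] => ""
  | p :: rest => (rest.foldl (fun b q => if b.2 < q.2 then q else b) p).1

def best_feature (rows : List (List String)) (feature_indices : List Int) : Option Int :=
  (feature_indices.foldl
    (fun (st : Option Int × Option Int) i =>
      let parts := pvPartition rows i
      let error : Int :=
        parts.values.foldl
          (fun error subset =>
            let labels := subset.map (fun r => (PySem.List.pyGet? r 0).getD "")
            let majority := pvMajority labels
            error + labels.foldl (fun a l => if l ≠ majority then a + 1 else a) 0)
          0
      -- lowest_error = float("inf") modelled as none; error < inf is always true
      let better : Bool := match st.2 with | none => true | some le => decide (error < le)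
      if better then (some i, some error) else st)
    (none, none)).1

-- ===== PORT B =====
-- pairs = sorted((row[i+1], row[0]) for row in rows): the generator, before sorting
def pvPairs (rows : List (List String)) (i : Int) : List (String × String) :=
  rows.map (fun r => ((PySem.List.pyGet? r (i + 1)).getD "", (PySem.List.pyGet? r 0).getD ""))

-- inner while loop: best label-run length; 'm' counts the contiguous run of group[0][1]
-- (group[m:] / group[:m] become dropWhile/takeWhile: exact, the scanned prefix is the run)
def pvRunMax : List (String × String) → Int → Int
  | [], best => best
  | p :: rest, best =>
      pvRunMax (rest.dropWhile (fun q => q.2 == p.2))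
        (max best (1 + ((rest.takeWhile (fun q => q.2 == p.2)).length : Int)))
termination_by l _ => l.length
decreasing_by
  exact Nat.lt_succ_of_le (List.Sublist.length_le (List.dropWhile_sublist _))

-- outer while loop: consume one equal-value block (pairs[:k] / pairs[k:]), add its best run
def pvGroups : List (String × String) → Int → Int
  | [], correct => correct
  | p :: rest, correct =>
      pvGroups (rest.dropWhile (fun q => q.1 == p.1))
        (correct + pvRunMax (p :: rest.takeWhile (fun q => q.1 == p.1)) 0)
termination_by l _ => l.length
decreasing_by
  exact Nat.lt_succ_of_le (List.Sublist.length_le (List.dropWhile_sublist _))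

def pvSplitError (rows : List (List String)) (i : Int) : Int :=
  (rows.length : Int) -
    pvGroups (PySem.List.sorted2 (pvPairs rows i) Prod.fst Prod.snd) 0

def best_feature_alt (rows : List (List String)) (feature_indices : List Int) : Option Int :=
  match feature_indices with
  | [] => none
  | _ :: _ => PySem.List.min? feature_indices (fun i => pvSplitError rows i)

-- ===== PRECONDITION & SPEC =====
-- Pre_ excludes exactly the inputs where the Python raises IndexError: some row[i+1]
-- (Python negative indexing) is out of range for a feature index i.
def Pre_best_feature (rows : List (List String)) (feature_indices : List Int) : Prop :=
  ∀ i ∈ feature_indices, ∀ row ∈ rows, PySem.Raise.InRange row.length (i + 1)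
instance (rows : List (List String)) (feature_indices : List Int) : Decidable (Pre_best_feature rows feature_indices) := by unfold Pre_best_feature; infer_instance

def pvWitness_best_feature : List (List String) × List Int :=
  ([["p", "a"], ["e", "a"], ["p", "b"]], [0])

def Spec_best_feature (rows : List (List String)) (feature_indices : List Int) (out : Option Int) : Prop := out = best_feature_alt rows feature_indices
instance (rows : List (List String)) (feature_indices : List Int) (out : Option Int) : Decidable (Spec_best_feature rows feature_indices out) := by unfold Spec_best_feature; infer_instance

-- ===== CLAIM (what is proved, stated in full; the proofs are below) =====
def Claim_equal_best_feature : Prop := ∀ (rows : List (List String)) (feature_indices : List Int), Dom_best_feature rows feature_indices → Pre_best_feature rows feature_indices → Spec_best_feature rows feature_indices (best_feature rows feature_indices)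

-- ===== LEMMAS AND PROOFS =====

-- proof-only abbreviations: the common value both per-feature errors are reduced to
def pvMaxcnt (ls : List String) : Int :=
  ((PySem.Set.ofList ls).map (fun l => (ls.count l : Int))).foldl max 0

def pvCorr (ps : List (String × String)) : Int :=
  ((PySem.Set.ofList (ps.map Prod.fst)).map
    (fun v => pvMaxcnt ((ps.filter (fun q => q.1 == v)).map Prod.snd))).sum

-- the comparison sorted2 sorts by (Python's lexicographic tuple <)
def pvLexBefore (a b : String × String) : Bool :=
  decide (a.1 < b.1) || (!decide (b.1 < a.1) && decide (a.2 < b.2))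

def pvR (a b : String × String) : Prop := pvLexBefore b a = false

theorem pvLexBefore_iff (a b : String × String) :
    pvLexBefore a b = true ↔ a.1 < b.1 ∨ (a.1 = b.1 ∧ a.2 < b.2) := by
  simp only [pvLexBefore, Bool.or_eq_true, Bool.and_eq_true, Bool.not_eq_true',
    decide_eq_true_eq, decide_eq_false_iff_not]
  constructor
  · rintro (h | ⟨h1, h2⟩)
    · exact Or.inl h
    · rcases lt_trichotomy a.1 b.1 with h3 | h3 | h3
      · exact Or.inl h3
      · exact Or.inr ⟨h3, h2⟩
      · exact absurd h3 h1
  · rintro (h | ⟨h1, h2⟩)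
    · exact Or.inl h
    · exact Or.inr ⟨by rw [h1]; exact lt_irrefl _, h2⟩

theorem pvR_iff (a b : String × String) :
    pvR a b ↔ a.1 < b.1 ∨ (a.1 = b.1 ∧ a.2 ≤ b.2) := by
  rw [pvR, ← Bool.not_eq_true, pvLexBefore_iff]
  constructor
  · intro h
    rcases lt_trichotomy a.1 b.1 with h1 | h1 | h1
    · exact Or.inl h1
    · refine Or.inr ⟨h1, ?_⟩
      by_contra h2
      exact h (Or.inr ⟨h1.symm, lt_of_not_ge h2⟩)
    · exact absurd (Or.inl h1) h
  · rintro (h | ⟨h1, h2⟩) hc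
    · rcases hc with hc | ⟨hc, _⟩
      · exact absurd h (lt_asymm hc)
      · rw [hc] at h; exact lt_irrefl _ h
    · rcases hc with hc | ⟨_, hc⟩
      · rw [h1] at hc; exact lt_irrefl _ hc
      · exact absurd h2 (not_le_of_gt hc)

theorem pvR_fst_le {a b : String × String} (h : pvR a b) : a.1 ≤ b.1 := by
  rcases (pvR_iff a b).mp h with h | ⟨h, _⟩
  · exact le_of_lt h
  · exact le_of_eq h

theorem pvR_snd_le {a b : String × String} (h : pvR a b) (he : a.1 = b.1) : a.2 ≤ b.2 := by
  rcases (pvR_iff a b).mp h with h1 | ⟨_, h1⟩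
  · rw [he] at h1; exact absurd h1 (lt_irrefl _)
  · exact h1

theorem pvLex_trans {a b c : String × String}
    (h1 : a.1 < b.1 ∨ (a.1 = b.1 ∧ a.2 < b.2)) (h2 : b.1 < c.1 ∨ (b.1 = c.1 ∧ b.2 < c.2)) :
    a.1 < c.1 ∨ (a.1 = c.1 ∧ a.2 < c.2) := by
  rcases h1 with h1 | ⟨h1a, h1b⟩ <;> rcases h2 with h2 | ⟨h2a, h2b⟩
  · exact Or.inl (lt_trans h1 h2)
  · exact Or.inl (h2a ▸ h1)
  · exact Or.inl (h1a ▸ h2)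
  · exact Or.inr ⟨h1a.trans h2a, lt_trans h1b h2b⟩

theorem pvLexBefore_asymm {a b : String × String} (h : pvLexBefore a b = true) :
    pvLexBefore b a = false := by
  rw [← Bool.not_eq_true, pvLexBefore_iff]
  rw [pvLexBefore_iff] at h
  intro hc
  rcases pvLex_trans h hc with h3 | ⟨h3, h4⟩
  · exact lt_irrefl _ h3
  · exact lt_irrefl _ h4

theorem pvLexBefore_trans_neg {x y z : String × String}
    (h1 : pvLexBefore x y = true) (h2 : pvLexBefore z y = false) :
    pvLexBefore z x = false := by
  rw [← Bool.not_eq_true, pvLexBefore_iff] at h2 ⊢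
  rw [pvLexBefore_iff] at h1
  intro hc
  exact h2 (pvLex_trans hc h1)

-- insertBy with a strict lexicographic comparison preserves Pairwise pvR
theorem pvInsertBy_pairwise (x : String × String) (acc : List (String × String))
    (h : acc.Pairwise pvR) : (PySem.List.insertBy pvLexBefore x acc).Pairwise pvR := by
  induction acc with
  | nil => simp [PySem.List.insertBy]
  | cons y ys ih =>
    rw [List.pairwise_cons] at h
    obtain ⟨hy, hys⟩ := h
    · show (PySem.List.insertBy pvLexBefore x (y :: ys)).Pairwise pvR
      rw [PySem.List.insertBy]
      by_cases hb : pvLexBefore x y = true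
      · rw [if_pos hb]
        refine List.Pairwise.cons ?_ (List.Pairwise.cons hy hys)
        intro z hz
        rcases List.mem_cons.mp hz with rfl | hz
        · exact pvLexBefore_asymm hb
        · exact pvLexBefore_trans_neg hb (hy z hz)
      · rw [if_neg hb]
        refine List.Pairwise.cons ?_ (ih hys)
        intro z hz
        rcases (PySem.List.mem_insertBy pvLexBefore x z ys).mp hz with rfl | hz
        · exact Bool.eq_false_iff.mpr hb
        · exact hy z hz

theorem pvSorted2_pairwise (xs : List (String × String)) :
    (PySem.List.sorted2 xs Prod.fst Prod.snd false).Pairwise pvR := by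
  show (xs.foldl (fun acc x => PySem.List.insertBy _ x acc) []).Pairwise pvR
  have hgen : ∀ (l : List (String × String)) (acc : List (String × String)),
      acc.Pairwise pvR →
      (l.foldl (fun acc x => PySem.List.insertBy pvLexBefore x acc) acc).Pairwise pvR := by
    intro l
    induction l with
    | nil => intro acc h; exact h
    | cons a t ih => intro acc h; exact ih _ (pvInsertBy_pairwise a acc h)
  exact hgen xs [] List.Pairwise.nil

-- running max over a nonnegatively-seeded fold
theorem pv_foldl_max_acc (l : List Int) : ∀ x : Int, 0 ≤ x →
    l.foldl max x = max x (l.foldl max 0) := by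
  induction l with
  | nil => intro x hx; simp [max_eq_left hx]
  | cons a t ih =>
    intro x hx
    simp only [List.foldl_cons]
    have hxa : max x (max 0 a) = max x a := by rw [← max_assoc, max_eq_left hx]
    rw [ih (max x a) (le_trans hx (le_max_left _ _)), ih (max 0 a) (le_max_left _ _),
      ← max_assoc, hxa]

theorem pv_foldl_max_nonneg (l : List Int) : 0 ≤ l.foldl max 0 :=
  (PySem.List.le_foldl_max l 0).1

theorem pvMaxcnt_nonneg (ls : List String) : 0 ≤ pvMaxcnt ls := pv_foldl_max_nonneg _

-- permutation invariance
theorem pvOfList_perm {α : Type} [BEq α] [LawfulBEq α] {l l' : List α} (h : l.Perm l') :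
    (PySem.Set.ofList l).Perm (PySem.Set.ofList l') := by
  rw [List.perm_ext_iff_of_nodup (PySem.Set.nodup_ofList _) (PySem.Set.nodup_ofList _)]
  intro a
  rw [PySem.Set.mem_ofList, PySem.Set.mem_ofList]
  exact h.mem_iff

theorem pvMaxcnt_perm {ls ls' : List String} (h : ls.Perm ls') : pvMaxcnt ls = pvMaxcnt ls' := by
  unfold pvMaxcnt
  haveI : RightCommutative (fun (b a : Int) => max b a) := ⟨fun b a1 a2 => max_right_comm b a1 a2⟩
  have h1 : ((PySem.Set.ofList ls).map (fun l => (ls.count l : Int))).Perm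
      ((PySem.Set.ofList ls').map (fun l => (ls'.count l : Int))) := by
    have h2 : ((PySem.Set.ofList ls).map (fun l => (ls.count l : Int)))
        = ((PySem.Set.ofList ls).map (fun l => (ls'.count l : Int))) := by
      apply List.map_congr_left
      intro x _
      rw [h.count_eq]
    rw [h2]
    exact (pvOfList_perm h).map _
  exact h1.foldl_eq 0

theorem pvCorr_perm {ps qs : List (String × String)} (h : ps.Perm qs) : pvCorr ps = pvCorr qs := by
  unfold pvCorr
  have h1 : ((PySem.Set.ofList (ps.map Prod.fst)).map
      (fun v => pvMaxcnt ((ps.filter (fun q => q.1 == v)).map Prod.snd))).Perm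
      ((PySem.Set.ofList (qs.map Prod.fst)).map
      (fun v => pvMaxcnt ((qs.filter (fun q => q.1 == v)).map Prod.snd))) := by
    have h2 : ((PySem.Set.ofList (ps.map Prod.fst)).map
        (fun v => pvMaxcnt ((ps.filter (fun q => q.1 == v)).map Prod.snd)))
        = ((PySem.Set.ofList (ps.map Prod.fst)).map
        (fun v => pvMaxcnt ((qs.filter (fun q => q.1 == v)).map Prod.snd))) := by
      apply List.map_congr_left
      intro v _
      exact pvMaxcnt_perm ((h.filter _).map _)
    rw [h2]
    exact (pvOfList_perm (h.map _)).map _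
  exact h1.sum_eq

-- ofList of a constant prefix followed by a v-free tail
theorem pvDiscard_of_not_mem {v : String} {s : List String} (h : v ∉ s) :
    PySem.Set.discard s v = s := by
  apply List.filter_eq_self.mpr
  intro a ha
  simp only [Bool.not_eq_eq_eq_not, Bool.not_true, beq_eq_false_iff_ne, ne_eq]
  intro hav
  exact h (hav ▸ ha)

theorem pvOfList_const_discard (v : String) (l2 : List String) (h2 : v ∉ l2) :
    ∀ t : List String, (∀ x ∈ t, x = v) →
    PySem.Set.discard (PySem.Set.ofList (t ++ l2)) v = PySem.Set.ofList l2 := by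
  intro t
  induction t with
  | nil =>
    intro _
    exact pvDiscard_of_not_mem (fun hc => h2 ((PySem.Set.mem_ofList _ _).mp hc))
  | cons a t' ih =>
    intro ht
    have ha : a = v := ht a (List.mem_cons_self)
    subst ha
    rw [List.cons_append, PySem.Set.ofList_cons]
    show List.filter _ (a :: _) = _
    rw [List.filter_cons]
    simp only [beq_self_eq_true, Bool.not_true, Bool.false_eq_true, if_false]
    show PySem.Set.discard (PySem.Set.discard (PySem.Set.ofList (t' ++ l2)) a) a = _
    rw [PySem.Set.discard, PySem.Set.discard, List.filter_filter]
    have : (fun y => !(y == a) && !(y == a)) = fun y => !(y == a) := by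
      funext y; rw [Bool.and_self]
    rw [this]
    exact ih (fun x hx => ht x (List.mem_cons_of_mem _ hx))

theorem pvOfList_prefix (v : String) (t l2 : List String)
    (h1 : ∀ x ∈ t, x = v) (h2 : v ∉ l2) :
    PySem.Set.ofList (v :: (t ++ l2)) = v :: PySem.Set.ofList l2 := by
  rw [PySem.Set.ofList_cons, pvOfList_const_discard v l2 h2 t h1]

-- elements after dropWhile (· == v) never have key v, on a key-sorted list
theorem pvDropWhile_key_ne {α : Type} (f : α → String) (v : String) :
    ∀ (l : List α), l.Pairwise (fun a b => f a ≤ f b) → (∀ z ∈ l, v ≤ f z) →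
    ∀ z ∈ l.dropWhile (fun q => f q == v), f z ≠ v := by
  intro l
  induction l with
  | nil => intro _ _ z hz; simp at hz
  | cons q t ih =>
    intro hp hv z hz
    rcases hp with _ | ⟨hq, ht⟩
    rw [List.dropWhile_cons] at hz
    by_cases hqv : f q = v
    · rw [if_pos (by simp [hqv])] at hz
      exact ih ht (fun y hy => hv y (List.mem_cons_of_mem _ hy)) z hz
    · rw [if_neg (by simp [hqv])] at hz
      have hvq : v < f q := lt_of_le_of_ne (hv q List.mem_cons_self) (fun h => hqv h.symm)
      rcases List.mem_cons.mp hz with rfl | hz'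
      · exact hqv
      · exact fun hc => absurd (lt_of_lt_of_le hvq (hq z hz')) (by rw [hc]; exact lt_irrefl _)

-- ======== the inner loop: best run on a snd-sorted constant-fst block ========
theorem pvRunMax_eq (l : List (String × String)) (b : Int)
    (hp : l.Pairwise (fun a c => a.2 ≤ c.2)) (hb : 0 ≤ b) :
    pvRunMax l b = max b (pvMaxcnt (l.map Prod.snd)) := by
  induction l, b using pvRunMax.induct with
  | case1 b =>
    rw [pvRunMax]
    simp [pvMaxcnt, PySem.Set.ofList_nil, max_eq_left hb]
  | case2 p rest b ih =>
    obtain ⟨hpr, hrest⟩ := List.pairwise_cons.mp hp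
    have hsplit : rest.takeWhile (fun q => q.2 == p.2) ++ rest.dropWhile (fun q => q.2 == p.2)
        = rest := List.takeWhile_append_dropWhile
    have htv : ∀ x ∈ rest.takeWhile (fun q => q.2 == p.2), x.2 = p.2 := fun x hx => by
      simpa using List.mem_takeWhile_imp hx
    have hr'mem : ∀ z ∈ rest.dropWhile (fun q => q.2 == p.2), z.2 ≠ p.2 :=
      pvDropWhile_key_ne Prod.snd p.2 rest hrest (fun z hz => hpr z hz)
    have hr'p : (rest.dropWhile (fun q => q.2 == p.2)).Pairwise (fun a c => a.2 ≤ c.2) :=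
      List.Pairwise.sublist (List.dropWhile_sublist _) hrest
    have hmapdecomp : (p :: rest).map Prod.snd
        = p.2 :: ((rest.takeWhile (fun q => q.2 == p.2)).map Prod.snd
            ++ (rest.dropWhile (fun q => q.2 == p.2)).map Prod.snd) := by
      rw [List.map_cons, ← List.map_append, hsplit]
    have hnotin : p.2 ∉ (rest.dropWhile (fun q => q.2 == p.2)).map Prod.snd := by
      intro hc
      obtain ⟨z, hz, hz2⟩ := List.mem_map.mp hc
      exact hr'mem z hz hz2
    have hdedup : PySem.Set.ofList ((p :: rest).map Prod.snd)
        = p.2 :: PySem.Set.ofList ((rest.dropWhile (fun q => q.2 == p.2)).map Prod.snd) := by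
      rw [hmapdecomp]
      exact pvOfList_prefix p.2 _ _
        (fun x hx => by obtain ⟨z, hz, rfl⟩ := List.mem_map.mp hx; exact htv z hz) hnotin
    have hc0 : (((p :: rest).map Prod.snd).count p.2 : Int)
        = 1 + ((rest.takeWhile (fun q => q.2 == p.2)).length : Int) := by
      rw [hmapdecomp]
      have h1 : ((rest.takeWhile (fun q => q.2 == p.2)).map Prod.snd).count p.2
          = (rest.takeWhile (fun q => q.2 == p.2)).length := by
        have hcl := List.count_eq_length.mpr
          (fun x hx => by obtain ⟨z, hz, rfl⟩ := List.mem_map.mp hx;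
                          exact (htv z hz).symm :
            ∀ x ∈ (rest.takeWhile (fun q => q.2 == p.2)).map Prod.snd, p.2 = x)
        rw [hcl, List.length_map]
      have h2 : ((rest.dropWhile (fun q => q.2 == p.2)).map Prod.snd).count p.2 = 0 :=
        List.count_eq_zero.mpr hnotin
      rw [List.count_cons_self, List.count_append, h1, h2]
      push_cast
      ring
    have hcnt : ∀ v ∈ PySem.Set.ofList ((rest.dropWhile (fun q => q.2 == p.2)).map Prod.snd),
        ((p :: rest).map Prod.snd).count v
          = ((rest.dropWhile (fun q => q.2 == p.2)).map Prod.snd).count v := by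
      intro v hv
      have hvne : v ≠ p.2 := by
        obtain ⟨z, hz, rfl⟩ := List.mem_map.mp ((PySem.Set.mem_ofList _ _).mp hv)
        exact hr'mem z hz
      have ht0 : ((rest.takeWhile (fun q => q.2 == p.2)).map Prod.snd).count v = 0 :=
        List.count_eq_zero.mpr
          (fun hc => by obtain ⟨z, hz, rfl⟩ := List.mem_map.mp hc; exact hvne (htv z hz))
      rw [hmapdecomp, List.count_cons_of_ne (Ne.symm hvne), List.count_append, ht0]
      omega
    have hmax : pvMaxcnt ((p :: rest).map Prod.snd)
        = max (1 + ((rest.takeWhile (fun q => q.2 == p.2)).length : Int))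
            (pvMaxcnt ((rest.dropWhile (fun q => q.2 == p.2)).map Prod.snd)) := by
      unfold pvMaxcnt
      rw [hdedup, List.map_cons, List.foldl_cons]
      have hmc : (PySem.Set.ofList ((rest.dropWhile (fun q => q.2 == p.2)).map Prod.snd)).map
            (fun l => ((((p :: rest).map Prod.snd).count l : Nat) : Int))
          = (PySem.Set.ofList ((rest.dropWhile (fun q => q.2 == p.2)).map Prod.snd)).map
            (fun l => ((((rest.dropWhile (fun q => q.2 == p.2)).map Prod.snd).count l : Nat) : Int)) :=
        List.map_congr_left (fun v hv => by rw [hcnt v hv])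
      rw [hmc, pv_foldl_max_acc _ _ (le_max_left 0 _), hc0,
        max_eq_right (by positivity : (0:Int) ≤ 1 + ((rest.takeWhile (fun q => q.2 == p.2)).length : Int))]
    rw [pvRunMax, ih hr'p (le_trans hb (le_max_left _ _)), hmax, max_assoc]

-- ======== the outer loop: one equal-value block at a time ========
theorem pvGroups_eq (l : List (String × String)) (c : Int) (hp : l.Pairwise pvR) :
    pvGroups l c = c + pvCorr l := by
  induction l, c using pvGroups.induct with
  | case1 c =>
    rw [pvGroups]
    simp [pvCorr, PySem.Set.ofList_nil]
  | case2 p rest c ih =>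
    obtain ⟨hpr, hrest⟩ := List.pairwise_cons.mp hp
    have hsplit : rest.takeWhile (fun q => q.1 == p.1) ++ rest.dropWhile (fun q => q.1 == p.1)
        = rest := List.takeWhile_append_dropWhile
    have htv : ∀ x ∈ rest.takeWhile (fun q => q.1 == p.1), x.1 = p.1 := fun x hx => by
      simpa using List.mem_takeWhile_imp hx
    have hr'mem : ∀ z ∈ rest.dropWhile (fun q => q.1 == p.1), z.1 ≠ p.1 :=
      pvDropWhile_key_ne Prod.fst p.1 rest (hrest.imp pvR_fst_le)
        (fun z hz => pvR_fst_le (hpr z hz))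
    have hr'p : (rest.dropWhile (fun q => q.1 == p.1)).Pairwise pvR :=
      List.Pairwise.sublist (List.dropWhile_sublist _) hrest
    have hgrpsub : (p :: rest.takeWhile (fun q => q.1 == p.1)).Sublist (p :: rest) :=
      List.Sublist.cons₂ p (List.takeWhile_sublist _)
    have hgrpR : (p :: rest.takeWhile (fun q => q.1 == p.1)).Pairwise pvR :=
      List.Pairwise.sublist hgrpsub hp
    have hgrpfst : ∀ x ∈ p :: rest.takeWhile (fun q => q.1 == p.1), x.1 = p.1 := by
      intro x hx
      rcases List.mem_cons.mp hx with rfl | hx'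
      · rfl
      · exact htv x hx'
    have hgrpS : (p :: rest.takeWhile (fun q => q.1 == p.1)).Pairwise (fun a c => a.2 ≤ c.2) :=
      List.Pairwise.imp_of_mem
        (fun ha hb hr => pvR_snd_le hr ((hgrpfst _ ha).trans (hgrpfst _ hb).symm)) hgrpR
    -- the filter of the whole list at the head value is exactly the block
    have hfiltert : (rest.takeWhile (fun q => q.1 == p.1)).filter (fun q => q.1 == p.1)
        = rest.takeWhile (fun q => q.1 == p.1) :=
      List.filter_eq_self.mpr (fun x hx => by simp [htv x hx])
    have hfilterr : (rest.dropWhile (fun q => q.1 == p.1)).filter (fun q => q.1 == p.1) = [] := by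
      rw [List.filter_eq_nil_iff]
      intro x hx
      simp [hr'mem x hx]
    have hfr : rest.filter (fun q => q.1 == p.1) = rest.takeWhile (fun q => q.1 == p.1) := by
      conv_lhs => rw [← hsplit]
      rw [List.filter_append, hfiltert, hfilterr, List.append_nil]
    have hfil : (p :: rest).filter (fun q => q.1 == p.1)
        = p :: rest.takeWhile (fun q => q.1 == p.1) := by
      rw [List.filter_cons, if_pos (by simp), hfr]
    have hfil2 : ∀ v, v ≠ p.1 → (p :: rest).filter (fun q => q.1 == v)
        = (rest.dropWhile (fun q => q.1 == p.1)).filter (fun q => q.1 == v) := by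
      intro v hv
      have hfv : (rest.takeWhile (fun q => q.1 == p.1)).filter (fun q => q.1 == v) = [] := by
        rw [List.filter_eq_nil_iff]
        intro x hx
        simp only [htv x hx, beq_eq_false_iff_ne, ne_eq, Bool.not_eq_true]
        exact fun h => hv h.symm
      have hfv2 : rest.filter (fun q => q.1 == v)
          = (rest.dropWhile (fun q => q.1 == p.1)).filter (fun q => q.1 == v) := by
        conv_lhs => rw [← hsplit]
        rw [List.filter_append, hfv, List.nil_append]
      rw [List.filter_cons, if_neg (by simp only [beq_iff_eq]; exact fun h => hv h.symm), hfv2]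
    have hnotin : p.1 ∉ (rest.dropWhile (fun q => q.1 == p.1)).map Prod.fst := by
      intro hc
      obtain ⟨z, hz, hz2⟩ := List.mem_map.mp hc
      exact hr'mem z hz hz2
    have hmd : (p :: rest).map Prod.fst
        = p.1 :: ((rest.takeWhile (fun q => q.1 == p.1)).map Prod.fst
            ++ (rest.dropWhile (fun q => q.1 == p.1)).map Prod.fst) := by
      rw [List.map_cons, ← List.map_append, hsplit]
    have hdedup : PySem.Set.ofList ((p :: rest).map Prod.fst)
        = p.1 :: PySem.Set.ofList ((rest.dropWhile (fun q => q.1 == p.1)).map Prod.fst) := by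
      rw [hmd]
      exact pvOfList_prefix p.1 _ _
        (fun x hx => by obtain ⟨z, hz, rfl⟩ := List.mem_map.mp hx; exact htv z hz) hnotin
    have hcorr : pvCorr (p :: rest)
        = pvMaxcnt ((p :: rest.takeWhile (fun q => q.1 == p.1)).map Prod.snd)
          + pvCorr (rest.dropWhile (fun q => q.1 == p.1)) := by
      unfold pvCorr
      rw [hdedup, List.map_cons, List.sum_cons, hfil]
      congr 1
      refine congrArg List.sum (List.map_congr_left ?_)
      intro v hv
      have hvne : v ≠ p.1 := by
        obtain ⟨z, hz, rfl⟩ := List.mem_map.mp ((PySem.Set.mem_ofList _ _).mp hv)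
        exact hr'mem z hz
      rw [hfil2 v hvne]
    have hrun : pvRunMax (p :: rest.takeWhile (fun q => q.1 == p.1)) 0
        = pvMaxcnt ((p :: rest.takeWhile (fun q => q.1 == p.1)).map Prod.snd) := by
      rw [pvRunMax_eq _ 0 hgrpS le_rfl, max_eq_right (pvMaxcnt_nonneg _)]
    rw [pvGroups, ih hr'p, hcorr, hrun]
    ring

-- ======== A's per-feature error (hash partition + majority vote) ========
-- most_common(1)[0] picks an item of the counter whose count is the running max of all counts
theorem pv_argmax_mem_max (rest : List (String × Int)) (p : String × Int) :
    (rest.foldl (fun b q => if b.2 < q.2 then q else b) p) ∈ p :: rest ∧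
    (rest.foldl (fun b q => if b.2 < q.2 then q else b) p).2
      = rest.foldl (fun m q => max m q.2) p.2 := by
  induction rest generalizing p with
  | nil => simp
  | cons q t ih =>
    simp only [List.foldl_cons]
    by_cases h : p.2 < q.2
    · rw [if_pos h]
      rcases ih q with ⟨hm, he⟩
      refine ⟨?_, ?_⟩
      · rcases List.mem_cons.mp hm with h1 | h1 <;> simp [h1]
      · rw [he, max_eq_right (le_of_lt h)]
    · rw [if_neg h]
      rcases ih p with ⟨hm, he⟩
      refine ⟨?_, ?_⟩
      · rcases List.mem_cons.mp hm with h1 | h1 <;> simp [h1]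
      · rw [he, max_eq_left (le_of_not_gt h)]

theorem pv_counter_values_repr (xs : List String) :
    (PySem.Dict.counter xs).values
      = (PySem.Set.ofList xs).map (fun k => ((xs.count k : Nat) : Int)) := by
  show ((PySem.Dict.counter xs).items).map (·.2) = _
  rw [PySem.Dict.items_counter, List.map_map]
  rfl

-- the counts in Counter(labels) sum to len(labels)
theorem pv_counter_values_sum (labels : List String) :
    (PySem.Dict.counter labels).values.sum = (labels.length : Int) := by
  have hperm : (PySem.Set.ofList labels).Perm labels.dedup := by
    apply (List.perm_ext_iff_of_nodup (PySem.Set.nodup_ofList _) labels.nodup_dedup).mpr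
    intro x
    rw [PySem.Set.mem_ofList, List.mem_dedup]
  rw [pv_counter_values_repr, List.Perm.sum_eq (hperm.map _)]
  have h2 := List.sum_map_count_dedup_eq_length labels
  calc (labels.dedup.map (fun k => (labels.count k : Int))).sum
      = ((labels.dedup.map (fun k => labels.count k)).map (Nat.cast)).sum := by
        rw [List.map_map]; rfl
    _ = ((labels.dedup.map (fun k => labels.count k)).sum : Int) := (Nat.cast_list_sum _).symm
    _ = (labels.length : Int) := by rw [h2]

theorem pv_countP_split (l : List String) (m : String) :
    l.countP (fun x => !(x == m)) + l.countP (fun x => x == m) = l.length := by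
  induction l with
  | nil => simp
  | cons a t ih => by_cases h : a = m <;> simp [h] <;> omega

-- one group's error: mismatches against the majority = total count - max count
theorem pv_group_err (labels : List String) (hne : labels ≠ []) :
    labels.foldl (fun a l => if l ≠ pvMajority labels then a + 1 else a) (0:Int)
      = (PySem.Dict.counter labels).values.sum -
        (match (PySem.Dict.counter labels).values with
         | [] => 0 | v :: vs => vs.foldl max v) := by
  have hitems := PySem.Dict.items_counter (xs := labels)
  obtain ⟨p, rest, hpr⟩ : ∃ p rest, (PySem.Dict.counter labels).items = p :: rest := by
    rcases hl : (PySem.Dict.counter labels).items with _ | ⟨p, rest⟩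
    · exfalso
      rw [hl] at hitems
      rcases labels with _ | ⟨l, t⟩
      · exact hne rfl
      · rw [PySem.Set.ofList_cons] at hitems
        simp at hitems
    · exact ⟨p, rest, rfl⟩
  set m := pvMajority labels with hm
  have hmaj : m = (rest.foldl (fun b q => if b.2 < q.2 then q else b) p).1 := by
    rw [hm, pvMajority, hpr]
  obtain ⟨hmem, hmax⟩ := pv_argmax_mem_max rest p
  have hnodup : ((PySem.Dict.counter labels).keys).Nodup := PySem.Dict.nodup_keys_counter _
  have hgetD : (PySem.Dict.counter labels).getD m 0
      = (rest.foldl (fun b q => if b.2 < q.2 then q else b) p).2 := by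
    rw [hmaj]
    exact PySem.Dict.getD_of_mem_items _ (by rw [hpr]; exact Prod.mk.eta ▸ hmem) hnodup 0
  have hcount : (labels.count m : Int)
      = rest.foldl (fun mx q => max mx q.2) p.2 := by
    rw [← PySem.Dict.getD_counter, hgetD, hmax]
  have hvals : (PySem.Dict.counter labels).values = p.2 :: rest.map (·.2) := by
    show ((PySem.Dict.counter labels).items).map (·.2) = _
    rw [hpr]; rfl
  have hmatcharm : (match (PySem.Dict.counter labels).values with
         | [] => (0:Int) | v :: vs => vs.foldl max v)
      = rest.foldl (fun mx q => max mx q.2) p.2 := by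
    rw [hvals]
    show (rest.map (·.2)).foldl max p.2 = _
    rw [List.foldl_map]
  have hlhs : labels.foldl (fun a l => if l ≠ m then a + 1 else a) (0:Int)
      = (labels.countP (fun x => !(x == m)) : Int) := by
    rw [PySem.List.foldl_ite_add_one]
    have hc : labels.countP (fun l => decide (l ≠ m)) = labels.countP (fun x => !(x == m)) := by
      apply List.countP_congr; intro x _; simp
    rw [hc]
    ring
  have hsplit := pv_countP_split labels m
  have hcnt : labels.count m = labels.countP (fun x => x == m) := rfl
  rw [hlhs, pv_counter_values_sum, hmatcharm, ← hcount, hcnt]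
  omega

-- the counter's running max IS pvMaxcnt
theorem pvMaxcnt_eq_match (labels : List String) (hne : labels ≠ []) :
    (match (PySem.Dict.counter labels).values with
     | [] => (0:Int) | v :: vs => vs.foldl max v) = pvMaxcnt labels := by
  rcases hl : PySem.Set.ofList labels with _ | ⟨l0, ls⟩
  · exfalso
    rcases labels with _ | ⟨a, t⟩
    · exact hne rfl
    · have : a ∈ PySem.Set.ofList (a :: t) := (PySem.Set.mem_ofList _ _).mpr List.mem_cons_self
      rw [hl] at this
      exact absurd this (List.not_mem_nil)
  · rw [pv_counter_values_repr, hl]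
    unfold pvMaxcnt
    rw [hl]
    simp only [List.map_cons, List.foldl_cons]
    rw [pv_foldl_max_acc _ _ (le_max_left 0 _),
      pv_foldl_max_acc _ ((labels.count l0 : Nat) : Int) (Int.natCast_nonneg _),
      max_eq_right (Int.natCast_nonneg _)]

-- mismatches = group size - majority count
theorem pv_group_err' (labels : List String) (hne : labels ≠ []) :
    labels.foldl (fun a l => if l ≠ pvMajority labels then a + 1 else a) (0:Int)
      = (labels.length : Int) - pvMaxcnt labels := by
  rw [pv_group_err labels hne, pv_counter_values_sum, pvMaxcnt_eq_match labels hne]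

-- A's partition group at key v is the filter of rows whose key is v
theorem pv_partition_getD (rows : List (List String)) (i : Int) (v : String) :
    (pvPartition rows i).getD v []
      = rows.filter (fun r => (PySem.List.pyGet? r (i + 1)).getD "" == v) := by
  unfold pvPartition
  have h := PySem.Dict.getD_foldl_modify_append
      (l := rows.map (fun r => ((PySem.List.pyGet? r (i + 1)).getD "", r)))
      (d := (PySem.Dict.empty : PySem.Dict String (List (List String)))) (c := v)
  rw [List.foldl_map] at h
  simp only [PySem.Dict.getD_empty] at h
  rw [h, List.filter_map]
  simp [Function.comp_def]

theorem pv_partition_keys (rows : List (List String)) (i : Int) :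
    (pvPartition rows i).keys
      = PySem.Set.ofList (rows.map (fun r => (PySem.List.pyGet? r (i + 1)).getD "")) := by
  unfold pvPartition
  rw [PySem.Dict.keys_foldl_modify_key rows (fun r => (PySem.List.pyGet? r (i + 1)).getD "")
        [] (fun _ row => (· ++ [row]))]
  rw [PySem.Dict.keys_empty, PySem.Set.update_nil_left]

theorem pv_sum_map_sub {α : Type} (l : List α) (f g : α → Int) :
    (l.map (fun x => f x - g x)).sum = (l.map f).sum - (l.map g).sum := by
  induction l with
  | nil => simp
  | cons a t ih =>
    simp only [List.map_cons, List.sum_cons, ih]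
    ring

-- A's per-feature error equals n - pvCorr of the (value,label) pairs
theorem pv_errA_eq (rows : List (List String)) (i : Int) :
    (pvPartition rows i).values.foldl
      (fun error subset =>
        let labels := subset.map (fun r => (PySem.List.pyGet? r 0).getD "")
        let majority := pvMajority labels
        error + labels.foldl (fun a l => if l ≠ majority then a + 1 else a) 0)
      0
    = (rows.length : Int) - pvCorr (pvPairs rows i) := by
  have hkeys := pv_partition_keys rows i
  have hnd : (pvPartition rows i).keys.Nodup := by
    rw [hkeys]; exact PySem.Set.nodup_ofList _
  rw [PySem.List.foldl_add, PySem.Dict.values_eq_map_keys _ hnd ([]), zero_add, List.map_map,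
    hkeys]
  have hterm : ∀ v ∈ PySem.Set.ofList (rows.map (fun r => (PySem.List.pyGet? r (i + 1)).getD "")),
      ((fun subset =>
        let labels := subset.map (fun r => (PySem.List.pyGet? r 0).getD "")
        let majority := pvMajority labels
        labels.foldl (fun a l => if l ≠ majority then a + 1 else a) (0:Int)) ∘
        (fun k => (pvPartition rows i).getD k [])) v
      = (((rows.map (fun r => (PySem.List.pyGet? r (i + 1)).getD "")).count v : Nat) : Int)
        - pvMaxcnt (((pvPairs rows i).filter (fun q => q.1 == v)).map Prod.snd) := by
    intro v hv
    obtain ⟨r0, hr0mem, hr0⟩ := List.mem_map.mp ((PySem.Set.mem_ofList _ _).mp hv)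
    have hfilne : rows.filter (fun r => (PySem.List.pyGet? r (i + 1)).getD "" == v) ≠ [] := by
      intro hcontra
      have : r0 ∈ rows.filter (fun r => (PySem.List.pyGet? r (i + 1)).getD "" == v) :=
        List.mem_filter.mpr ⟨hr0mem, by simp [hr0]⟩
      rw [hcontra] at this
      exact absurd this (List.not_mem_nil)
    have hlabne : (rows.filter (fun r => (PySem.List.pyGet? r (i + 1)).getD "" == v)).map
        (fun r => (PySem.List.pyGet? r 0).getD "") ≠ [] := by
      simpa using hfilne
    have hpairsfil : ((pvPairs rows i).filter (fun q => q.1 == v)).map Prod.snd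
        = (rows.filter (fun r => (PySem.List.pyGet? r (i + 1)).getD "" == v)).map
            (fun r => (PySem.List.pyGet? r 0).getD "") := by
      unfold pvPairs
      rw [List.filter_map, List.map_map]
      rfl
    have hlen : ((rows.filter (fun r => (PySem.List.pyGet? r (i + 1)).getD "" == v)).map
        (fun r => (PySem.List.pyGet? r 0).getD "")).length
        = (rows.map (fun r => (PySem.List.pyGet? r (i + 1)).getD "")).count v := by
      rw [List.length_map, List.count_eq_countP, List.countP_map,
        ← List.countP_eq_length_filter]
      rfl
    simp only [Function.comp_apply, pv_partition_getD rows i v]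
    rw [pv_group_err' _ hlabne, hpairsfil, hlen]
  rw [List.map_congr_left hterm, pv_sum_map_sub]
  have hsumlen : ((PySem.Set.ofList
      (rows.map (fun r => (PySem.List.pyGet? r (i + 1)).getD ""))).map
      (fun v => (((rows.map (fun r => (PySem.List.pyGet? r (i + 1)).getD "")).count v : Nat) : Int))).sum
      = (rows.length : Int) := by
    have h := pv_counter_values_sum (rows.map (fun r => (PySem.List.pyGet? r (i + 1)).getD ""))
    rw [pv_counter_values_repr] at h
    rw [h, List.length_map]
  have hcorr : pvCorr (pvPairs rows i)
      = ((PySem.Set.ofList (rows.map (fun r => (PySem.List.pyGet? r (i + 1)).getD ""))).map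
          (fun v => pvMaxcnt (((pvPairs rows i).filter (fun q => q.1 == v)).map Prod.snd))).sum := by
    unfold pvCorr
    congr 2
    unfold pvPairs
    rw [List.map_map]
    rfl
  rw [hsumlen, hcorr]

theorem pv_feat_eq (rows : List (List String)) (i : Int) :
    (rows.length : Int) - pvCorr (pvPairs rows i) = pvSplitError rows i := by
  unfold pvSplitError
  rw [pvGroups_eq _ 0 (pvSorted2_pairwise _), zero_add,
    pvCorr_perm (PySem.List.sorted2_perm (pvPairs rows i) Prod.fst Prod.snd false)]

-- both selection loops compute the first strict minimum
theorem pv_select_eq (K : Int → Int) (t : List Int) : ∀ j : Int,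
    (t.foldl (fun (st : Option Int × Option Int) i =>
        let e := K i
        let better : Bool := match st.2 with | none => true | some le => decide (e < le)
        if better then (some i, some e) else st) (some j, some (K j))).1
    = PySem.List.min? (j :: t) K := by
  induction t with
  | nil =>
    intro j
    simp [PySem.List.min?]
  | cons i t ih =>
    intro j
    have h2 : PySem.List.min? (j :: i :: t) K
        = PySem.List.min? ((if K i < K j then i else j) :: t) K := by
      simp only [PySem.List.min?, List.foldl_cons]
      by_cases h : K i < K j <;> simp [h]
    rw [h2]
    simp only [List.foldl_cons]
    by_cases h : K i < K j
    · simp only [h, decide_true, if_pos]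
      exact ih i
    · simp only [h, decide_false, Bool.false_eq_true, if_false]
      exact ih j

-- A's fold step with the error replaced by B's split_error
theorem pv_stepA_eq (rows : List (List String)) (st : Option Int × Option Int) (i : Int) :
    (let error : Int :=
        (pvPartition rows i).values.foldl
          (fun error subset =>
            let labels := subset.map (fun r => (PySem.List.pyGet? r 0).getD "")
            let majority := pvMajority labels
            error + labels.foldl (fun a l => if l ≠ majority then a + 1 else a) 0)
          0
     let better : Bool := match st.2 with | none => true | some le => decide (error < le)
     if better then (some i, some error) else st)
    = (let e := pvSplitError rows i
       let better : Bool := match st.2 with | none => true | some le => decide (e < le)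
       if better then (some i, some e) else st) := by
  have h := (pv_errA_eq rows i).trans (pv_feat_eq rows i)
  exact congrArg (fun e : Int =>
    if (match st.2 with | none => true | some le => decide (e < le))
    then ((some i, some e) : Option Int × Option Int) else st) h

-- ===== VERDICT (by name: the statement is the Claim_ definition above) =====
theorem best_feature_spec : Claim_equal_best_feature := by
  intro rows fis _ _
  unfold Spec_best_feature
  cases fis with
  | nil => rfl
  | cons x t =>
    unfold best_feature best_feature_alt
    have hfold := PySem.List.foldl_congr_mem (l := x :: t)
      (init := ((none, none) : Option Int × Option Int))
      (f := fun (st : Option Int × Option Int) i =>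
        let parts := pvPartition rows i
        let error : Int :=
          parts.values.foldl
            (fun error subset =>
              let labels := subset.map (fun r => (PySem.List.pyGet? r 0).getD "")
              let majority := pvMajority labels
              error + labels.foldl (fun a l => if l ≠ majority then a + 1 else a) 0)
            0
        let better : Bool := match st.2 with | none => true | some le => decide (error < le)
        if better then (some i, some error) else st)
      (g := fun (st : Option Int × Option Int) i =>
        let e := pvSplitError rows i
        let better : Bool := match st.2 with | none => true | some le => decide (e < le)
        if better then (some i, some e) else st)
      (fun st i _ => pv_stepA_eq rows st i)
    rw [hfold]
    show ((t.foldl _ ((some x, some (pvSplitError rows x)) : Option Int × Option Int)).1 : Option Int) = _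
    rw [pv_select_eq (fun i => pvSplitError rows i) t x]
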